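-- pv_equiv track=rewrite | github.com/RatJuggler/advent-of-code | 2019/day8/advent8.py | display_image
-- ===== SOURCE A (Python) =====
-- def display_image(image, width, height):
--     display = ''
--     for y in range(height):
--         for x in range(width):
--             pixel = image[y * width + x]
--             if pixel == '2':
--                 raise Exception('Unexpected transparent pixel!')
--             display += 'X' if pixel == '1' else ' '
--         display += '\n'
--     return display
-- ===== SOURCE B (Python) =====
-- def display_image(image, width, height):
--     rows = []
--     for i in range(height):
--         row = image[i * width:(i + 1) * width]
--         if '2' in row:
--             raise Exception('Unexpected transparent pixel!')
--         rows.append(''.join('X' if pixel == '1' else ' ' for pixel in row))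
--     return ''.join(row + '\n' for row in rows)
-- ===== Notes on version B (the rewrite author's own statement) =====
-- stated objective: simpler
-- what changed: Replaces the nested per-pixel indexing loops with per-row slicing: each row is sliced out of the flat string in one step, checked for '2' as a whole, rendered by a bulk character map, and the rows are joined; no index arithmetic remains.
-- outside the precondition, e.g. on display_image('ab', -1, 2): A returns '\n\n', B returns ' \n\n'
import Mathlib
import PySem

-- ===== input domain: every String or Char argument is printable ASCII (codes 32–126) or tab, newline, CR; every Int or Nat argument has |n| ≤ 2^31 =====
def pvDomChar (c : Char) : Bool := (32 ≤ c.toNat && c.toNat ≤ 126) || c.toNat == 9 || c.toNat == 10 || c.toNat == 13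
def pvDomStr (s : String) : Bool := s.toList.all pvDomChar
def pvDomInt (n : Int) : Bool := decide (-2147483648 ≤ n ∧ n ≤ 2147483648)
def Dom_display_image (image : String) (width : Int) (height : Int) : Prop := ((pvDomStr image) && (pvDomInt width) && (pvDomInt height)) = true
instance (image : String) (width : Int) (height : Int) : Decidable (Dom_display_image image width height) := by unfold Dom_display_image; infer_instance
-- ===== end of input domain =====

-- B renders the image by slicing whole rows out of the flat string and joining them,
-- instead of A's nested per-pixel index loops; objective: simpler.


-- ===== PORT A =====
def display_image (image : String) (width : Int) (height : Int) : String :=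
  String.ofList ((PySem.List.pyRange 0 height 1).foldl (fun display y =>
    ((PySem.List.pyRange 0 width 1).foldl (fun d x =>
      match PySem.List.pyGet? image.toList (y * width + x) with
      | none => d                       -- Python raises IndexError here (excluded by Pre_)
      | some pixel =>
        if pixel = '2' then d           -- Python raises Exception here (excluded by Pre_)
        else d ++ [if pixel = '1' then 'X' else ' ']) display) ++ ['\n']) [])

-- ===== PORT B =====
def display_image_alt (image : String) (width : Int) (height : Int) : String :=
  let rows := (PySem.List.pyRange 0 height 1).foldl (fun rows i =>
    let row := PySem.List.slice image.toList (some (i * width)) (some ((i + 1) * width))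
    if PySem.Chars.isIn ['2'] row then rows   -- Python raises Exception here (excluded by Pre_)
    else rows ++ [row.map (fun pixel => if pixel = '1' then 'X' else ' ')]) []
  String.ofList ((rows.map (fun row => row ++ ['\n'])).flatten)

-- ===== PRECONDITION & SPEC =====
-- Pre_ excludes (a) inputs where A raises (image shorter than the scanned region, or a '2'
-- in the scanned region) and (b) widths in (-len, 0) with positive height, degenerate
-- negative counts outside the natural domain, on which A's blank-line output is an artefact
-- of its empty inner loop while B's negative slice bounds read from the end of the string
-- (more negative widths clamp every slice to empty and are kept inside, proved equal).
def Pre_display_image (image : String) (width : Int) (height : Int) : Prop :=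
  height ≤ 0 ∨ width ≤ -(image.toList.length : Int) ∨
    (0 ≤ width ∧ width * height ≤ (image.toList.length : Int) ∧
      '2' ∉ image.toList.take ((width * height).toNat))
instance (image : String) (width : Int) (height : Int) : Decidable (Pre_display_image image width height) := by unfold Pre_display_image; infer_instance

def pvWitness_display_image : String × Int × Int := ("110100", 3, 2)

def Spec_display_image (image : String) (width : Int) (height : Int) (out : String) : Prop := out = display_image_alt image width height
instance (image : String) (width : Int) (height : Int) (out : String) : Decidable (Spec_display_image image width height out) := by unfold Spec_display_image; infer_instance

-- ===== CLAIM (what is proved, stated in full; the proofs are below) =====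
def Claim_equal_display_image : Prop := ∀ (image : String) (width : Int) (height : Int), Dom_display_image image width height → Pre_display_image image width height → Spec_display_image image width height (display_image image width height)

-- ===== LEMMAS AND PROOFS =====

-- the rendered characters of row starting at flat offset b
def pvRow (cs : List Char) (w b : Nat) : List Char :=
  ((cs.drop b).take w).map (fun c => if c = '1' then 'X' else ' ')

-- A's inner loop over one in-bounds, '2'-free row appends the rendered slice.
lemma rowA (cs : List Char) (w b : Nat) (d : List Char)
    (hb : b + w ≤ cs.length)
    (h2 : ∀ k, b ≤ k → k < b + w → ∀ hk : k < cs.length, cs[k] ≠ '2') :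
    (PySem.List.pyRange 0 (w : Int) 1).foldl (fun d x =>
      match PySem.List.pyGet? cs ((b : Int) + x) with
      | none => d
      | some pixel =>
        if pixel = '2' then d
        else d ++ [if pixel = '1' then 'X' else ' ']) d
      = d ++ pvRow cs w b := by
  rw [PySem.List.foldl_congr_mem (g := fun d x =>
      d ++ [if cs.getD ((b : Int) + x).toNat ' ' = '1' then 'X' else ' '])]
  · rw [PySem.List.foldl_append_singleton_eq_map]
    congr 1
    rw [PySem.List.pyRange_one]
    simp only [Int.sub_zero, Int.toNat_natCast, List.map_map]
    apply List.ext_getElem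
    · simp [Nat.le_sub_of_add_le' hb, pvRow]
    · intro i h1 h3
      simp only [pvRow, List.getElem_map, List.getElem_range, Function.comp_apply,
        List.getElem_take, List.getElem_drop]
      have : ((b : Int) + (0 + (i : Int))).toNat = b + i := by omega
      rw [this, List.getD_eq_getElem]
  · intro a x hx
    rw [PySem.List.mem_pyRange_one] at hx
    have h1 : (0:Int) ≤ (b:Int) + x := by omega
    have h2' : (b:Int) + x < cs.length := by omega
    rw [PySem.List.pyGet?_eq_some_getElem cs (i := (b:Int)+x) h1 h2']
    simp only
    have hne : cs[((b:Int)+x).toNat]'(by omega) ≠ '2' := h2 _ (by omega) (by omega) (by omega)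
    rw [if_neg hne, List.getD_eq_getElem cs ' ' (by omega)]

-- when every slice bound clamps to nothing, both programs print blank lines
lemma blank_eq (image : String) (width : Int) (height : Int)
    (hneg : width < 0) (hle : width ≤ -(image.toList.length : Int)) :
    display_image image width height = display_image_alt image width height := by
  unfold display_image display_image_alt
  simp only
  congr 1
  have hslice : ∀ i : Int, 0 ≤ i →
      PySem.List.slice image.toList (some (i * width)) (some ((i + 1) * width)) = [] := by
    intro i hi
    apply List.eq_nil_of_length_eq_zero
    rw [PySem.List.length_slice]
    have c1 : PySem.List.clampIdx image.toList.length (i * width) = 0 := by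
      rcases Nat.eq_zero_or_pos i.toNat with h0 | hpos
      · have : i = 0 := by omega
        simp [this, PySem.List.clampIdx]
      · have hi1 : 1 ≤ i := by omega
        have hk : i * width ≤ -(image.toList.length : Int) := by nlinarith
        have hk0 : i * width < 0 := by nlinarith
        obtain ⟨t, ht⟩ : ∃ t, i * width = t := ⟨_, rfl⟩
        rw [ht] at hk hk0 ⊢
        have : t = -(((-t).toNat : Nat) : Int) := by omega
        rw [this, PySem.List.clampIdx_neg_natCast _ _ (by omega)]
        omega
    have c2 : PySem.List.clampIdx image.toList.length ((i + 1) * width) = 0 := by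
      have hi1 : 1 ≤ i + 1 := by omega
      have hk : (i + 1) * width ≤ -(image.toList.length : Int) := by nlinarith
      have hk0 : (i + 1) * width < 0 := by nlinarith
      obtain ⟨t, ht⟩ : ∃ t, (i + 1) * width = t := ⟨_, rfl⟩
      rw [ht] at hk hk0 ⊢
      have : t = -(((-t).toNat : Nat) : Int) := by omega
      rw [this, PySem.List.clampIdx_neg_natCast _ _ (by omega)]
      omega
    omega
  rw [PySem.List.foldl_congr_mem (l := PySem.List.pyRange 0 height 1)
      (g := fun rows (i : Int) => rows ++ [([] : List Char)])]
  · rw [PySem.List.foldl_append_singleton_eq_map,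
      PySem.List.foldl_congr_mem (l := PySem.List.pyRange 0 height 1)
        (g := fun (d : List Char) (y : Int) => d ++ ['\n'])]
    · rw [PySem.List.foldl_append_singleton_eq_map]
      simp
    · intro a y hy
      rw [PySem.List.pyRange_one_eq_nil (by omega)]
      simp
  · intro a i hi
    rw [PySem.List.mem_pyRange_one] at hi
    rw [hslice i hi.1]
    norm_num [PySem.Chars.isIn, PySem.Chars.find_eq_neg_one_iff]

-- the in-bounds case: every row is the rendered slice
lemma pos_eq (image : String) (width : Int) (height : Int) (hh : ¬ height ≤ 0)
    (hw : 0 ≤ width) (hlen : width * height ≤ (image.toList.length : Int))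
    (h2 : '2' ∉ image.toList.take ((width * height).toNat)) :
    display_image image width height = display_image_alt image width height := by
  obtain ⟨w, hwe⟩ : ∃ w : Nat, width = (w : Int) := ⟨width.toNat, by omega⟩
  obtain ⟨hn, hhe⟩ : ∃ hn : Nat, height = (hn : Int) := ⟨height.toNat, by omega⟩
  subst hwe hhe
  have hh' : (0:Int) < (hn:Int) := by omega
  have hlen' : w * hn ≤ image.toList.length := by
    have := hlen; push_cast at this ⊢; omega
  have h2' : ∀ k, k < w * hn → ∀ hk : k < image.toList.length, image.toList[k] ≠ '2' := by
    intro k hk hkl heq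
    apply h2
    have hkk : k < ((w:Int) * hn).toNat := by rw [← Nat.cast_mul, Int.toNat_natCast]; exact hk
    have : (image.toList.take ((w:Int)*(hn:Int)).toNat)[k]'(by rw [List.length_take, ← Nat.cast_mul, Int.toNat_natCast]; omega) = image.toList[k] :=
      List.getElem_take
    rw [← heq, ← this]
    exact List.getElem_mem _
  -- A side
  have hA : display_image image (w:Int) (hn:Int) =
      String.ofList ((PySem.List.pyRange 0 (hn:Int) 1).flatMap
        (fun y => pvRow image.toList w (y.toNat * w) ++ ['\n'])) := by
    unfold display_image
    congr 1
    rw [PySem.List.foldl_congr_mem (g := fun display y =>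
      display ++ (pvRow image.toList w (y.toNat * w) ++ ['\n']))]
    · exact PySem.List.foldl_append_eq_flatMap _ _ _
    · intro a y hy
      rw [PySem.List.mem_pyRange_one] at hy
      have hyw : y * (w:Int) = ((y.toNat * w : Nat) : Int) := by
        push_cast [Int.toNat_of_nonneg hy.1]
        ring
      simp only [hyw]
      have hb : y.toNat * w + w ≤ image.toList.length := by
        have : y.toNat + 1 ≤ hn := by omega
        calc y.toNat * w + w = (y.toNat + 1) * w := by ring
        _ ≤ hn * w := Nat.mul_le_mul_right _ this
        _ = w * hn := Nat.mul_comm _ _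
        _ ≤ image.toList.length := hlen'
      rw [rowA image.toList w (y.toNat * w) a hb, List.append_assoc]
      intro k hk1 hk2 hkl
      exact h2' k (by nlinarith [Nat.mul_le_mul_right w (show y.toNat + 1 ≤ hn by omega)]) hkl
  -- B side
  have hB : display_image_alt image (w:Int) (hn:Int) =
      String.ofList ((PySem.List.pyRange 0 (hn:Int) 1).flatMap
        (fun y => pvRow image.toList w (y.toNat * w) ++ ['\n'])) := by
    unfold display_image_alt
    simp only
    congr 1
    rw [PySem.List.foldl_congr_mem (g := fun rows i =>
      rows ++ [pvRow image.toList w (i.toNat * w)])]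
    · rw [PySem.List.foldl_append_singleton_eq_map]
      simp [List.flatMap_def, List.map_map, Function.comp_def]
    · intro a i hi
      rw [PySem.List.mem_pyRange_one] at hi
      have e1 : i * (w:Int) = ((i.toNat * w : Nat) : Int) := by
        push_cast [Int.toNat_of_nonneg hi.1]
        ring
      have e2 : (i + 1) * (w:Int) = ((i.toNat * w + w : Nat) : Int) := by
        push_cast [Int.toNat_of_nonneg hi.1]
        ring
      have hrow : PySem.List.slice image.toList (some (i * (w:Int))) (some ((i+1) * (w:Int)))
          = (image.toList.drop (i.toNat * w)).take w := by
        rw [e1, e2, PySem.List.slice_natCast]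
        congr 1
        omega
      have hbnd : i.toNat * w + w ≤ w * hn := by
        nlinarith [Nat.mul_le_mul_right w (show i.toNat + 1 ≤ hn by omega)]
      have hno2 : PySem.Chars.isIn ['2'] ((image.toList.drop (i.toNat * w)).take w) = false := by
        rw [PySem.Chars.isIn_eq_false_iff]
        intro hinf
        have hmem : '2' ∈ (image.toList.drop (i.toNat * w)).take w := hinf.subset (by simp)
        obtain ⟨j, hj, hje⟩ := List.getElem_of_mem hmem
        simp only [List.getElem_take, List.getElem_drop] at hje
        have hjl : i.toNat * w + j < image.toList.length := by
          have := hj; simp at this; omega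
        exact h2' (i.toNat * w + j) (by simp at hj; omega) hjl hje
      simp only [hrow, hno2, Bool.false_eq_true, if_false, pvRow]
  rw [hA, hB]

lemma main_eq (image : String) (width : Int) (height : Int)
    (hpre : Pre_display_image image width height) :
    display_image image width height = display_image_alt image width height := by
  by_cases hh : height ≤ 0
  · simp [display_image, display_image_alt, PySem.List.pyRange_one_eq_nil hh]
  rcases hpre with h | hle | ⟨hw, hlen, h2⟩
  · omega
  · by_cases hwneg : width < 0
    · exact blank_eq image width height hwneg hle
    · have hw0 : width = 0 := by omega
      subst hw0
      exact pos_eq image 0 height hh (le_refl 0) (by simp) (by simp)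
  · exact pos_eq image width height hh hw hlen h2

-- ===== VERDICT (by name: the statement is the Claim_ definition above) =====
theorem display_image_spec : Claim_equal_display_image := by
  intro image width height _ hpre
  unfold Spec_display_image
  exact main_eq image width height hpre
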